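-- pv_equiv track=rewrite | github.com/Narendra-Lungare/StringCalculator | StringCalculator.py | replaceAlphabets
-- ===== SOURCE A (Python) =====
-- def replaceAlphabets(numbers):
--    # function for replacing the  alphabets
--    string_without_alphabets=""
--    for ch in numbers:
--       if(ch>='a' and ch<='z'):
--          string_without_alphabets+=str(ord(ch)-ord('a')+1)
--       else:
--          string_without_alphabets+=ch
--    return string_without_alphabets
-- ===== SOURCE B (Python) =====
-- def replaceAlphabets(numbers):
--     # 26 staged whole-string replace passes, one per letter; each pass rewrites
--     # every occurrence of that letter with its position number. The passes do not
--     # interfere: replacements insert only digit characters, never lowercase letters.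
--     for k in range(26):
--         numbers = numbers.replace(chr(97 + k), str(k + 1))
--     return numbers
-- ===== Notes on version B (the rewrite author's own statement) =====
-- stated objective: alternative
-- what changed: Replaces the single per-character loop with if/else accumulation by 26 staged whole-string str.replace passes, one per letter; this is correct because each pass inserts only digit characters, which no later pass rewrites.
import Mathlib
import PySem

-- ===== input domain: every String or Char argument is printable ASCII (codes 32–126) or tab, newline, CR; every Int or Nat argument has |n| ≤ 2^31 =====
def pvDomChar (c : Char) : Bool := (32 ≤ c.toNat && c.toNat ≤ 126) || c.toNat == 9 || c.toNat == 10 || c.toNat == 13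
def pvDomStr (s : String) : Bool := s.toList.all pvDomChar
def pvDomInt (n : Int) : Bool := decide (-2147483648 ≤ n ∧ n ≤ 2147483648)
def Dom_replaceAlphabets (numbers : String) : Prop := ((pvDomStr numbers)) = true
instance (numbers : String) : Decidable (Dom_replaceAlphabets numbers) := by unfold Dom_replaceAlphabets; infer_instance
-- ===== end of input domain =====

-- B replaces A's single per-character accumulation loop by 26 staged whole-string
-- replace passes (one per letter); correct because each pass inserts only digits,
-- which no later pass rewrites (alternative decomposition, same result).
-- ===== PORT A =====
def pvStepA (ch : Char) : List Char :=
  if ch ≥ 'a' ∧ ch ≤ 'z' then PySem.Int.toChars ((ch.toNat : Int) - 97 + 1)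
  else [ch]

def replaceAlphabets (numbers : String) : String :=
  String.ofList (numbers.toList.foldl (fun acc ch => acc ++ pvStepA ch) [])

-- ===== PORT B =====
-- one pass of the Source B loop body: numbers.replace(chr(97 + k), str(k + 1))
def pvPassB (s : String) (k : Int) : String :=
  PySem.Str.replace s (String.singleton (Char.ofNat (97 + k).toNat)) (PySem.Int.toStr (k + 1))

def replaceAlphabets_alt (numbers : String) : String :=
  (PySem.List.pyRange 0 26 1).foldl pvPassB numbers

-- ===== PRECONDITION & SPEC =====
def Spec_replaceAlphabets (numbers : String) (out : String) : Prop := out = replaceAlphabets_alt numbers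
instance (numbers : String) (out : String) : Decidable (Spec_replaceAlphabets numbers out) := by unfold Spec_replaceAlphabets; infer_instance

-- ===== CLAIM (what is proved, stated in full; the proofs are below) =====
def Claim_equal_replaceAlphabets : Prop := ∀ (numbers : String), Dom_replaceAlphabets numbers → Spec_replaceAlphabets numbers (replaceAlphabets numbers)

-- ===== LEMMAS AND PROOFS =====

-- the per-character effect of the first n staged passes (letters 'a'..chr(96+n) done)
def pvF (n : Nat) (c : Char) : List Char :=
  if 97 ≤ c.toNat ∧ c.toNat < 97 + n then PySem.Int.toChars ((c.toNat : Int) - 97 + 1)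
  else [c]

-- the per-character effect of pass n alone
def pvSubst (n : Nat) (c : Char) : List Char :=
  if c = Char.ofNat (97 + n) then PySem.Int.toChars ((n : Int) + 1) else [c]

-- replace with a single-character pattern is a per-character flatMap
theorem pvGoSingle (p : Char) (new : List Char) :
    ∀ (fuel : Nat) (l acc : List Char), l.length ≤ fuel →
      PySem.Chars.replace.go [p] new fuel l acc
        = acc.reverse ++ l.flatMap (fun c => if c = p then new else [c]) := by
  intro fuel
  induction fuel with
  | zero =>
    intro l acc h
    have : l = [] := List.eq_nil_of_length_eq_zero (Nat.le_zero.mp h)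
    subst this
    simp [PySem.Chars.replace.go]
  | succ fuel ih =>
    intro l acc h
    cases l with
    | nil => simp [PySem.Chars.replace.go]
    | cons c t =>
      by_cases hc : p = c
      · subst hc
        have hpre : [p].isPrefixOf (p :: t) = true := by simp [List.isPrefixOf]
        simp only [PySem.Chars.replace.go, hpre, if_true]
        have hdrop : List.drop [p].length (p :: t) = t := by simp
        rw [hdrop, ih t (new.reverse ++ acc) (by simpa using Nat.succ_le_succ_iff.mp h)]
        simp
      · have hpre : [p].isPrefixOf (c :: t) = false := by
          simp [List.isPrefixOf]; exact hc
        simp only [PySem.Chars.replace.go, hpre, Bool.false_eq_true, if_false]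
        rw [ih t (c :: acc) (by simpa using Nat.succ_le_succ_iff.mp h)]
        have hne : ¬ (c = p) := fun h' => hc h'.symm
        simp [hne]

theorem pvReplaceSingle (p : Char) (new s : List Char) :
    PySem.Chars.replace s [p] new = s.flatMap (fun c => if c = p then new else [c]) := by
  unfold PySem.Chars.replace
  rw [pvGoSingle p new s.length s [] le_rfl]
  simp

-- applying pass n to a character already rewritten by the first n passes
set_option maxRecDepth 40000 in
theorem pvKey : ∀ n ∈ List.range 26, ∀ m ∈ List.range 127,
    (pvF n (Char.ofNat m)).flatMap (pvSubst n) = pvF (n + 1) (Char.ofNat m) := by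
  decide

theorem pvKeyC (n : Nat) (hn : n < 26) (c : Char) (hc : pvDomChar c = true) :
    (pvF n c).flatMap (pvSubst n) = pvF (n + 1) c := by
  have hlt : c.toNat < 127 := by
    simp only [pvDomChar, Bool.or_eq_true, Bool.and_eq_true, decide_eq_true_eq,
      beq_iff_eq] at hc
    omega
  have := pvKey n (List.mem_range.mpr hn) c.toNat (List.mem_range.mpr hlt)
  simpa using this

theorem pvStepAll (n : Nat) (hn : n < 26) :
    ∀ l : List Char, (∀ c ∈ l, pvDomChar c = true) →
      (l.flatMap (pvF n)).flatMap (pvSubst n) = l.flatMap (pvF (n + 1)) := by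
  intro l
  induction l with
  | nil => intro _; simp
  | cons c t ih =>
    intro hdom
    simp only [List.flatMap_cons, List.flatMap_append]
    rw [pvKeyC n hn c (hdom c List.mem_cons_self),
        ih (fun d hd => hdom d (List.mem_cons_of_mem c hd))]

-- one pass of B, on the character list
theorem pvPassB_toList (s : String) (n : Nat) :
    (pvPassB s (n : Int)).toList = s.toList.flatMap (pvSubst n) := by
  unfold pvPassB pvSubst
  have htn : (97 + (n : Int)).toNat = 97 + n := by omega
  rw [PySem.Str.toList_replace, String.toList_singleton, htn,
      PySem.Int.toList_toStr, pvReplaceSingle]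

-- the first n staged passes of B, on the character list
theorem pvB_chars (numbers : String) (hdom : ∀ c ∈ numbers.toList, pvDomChar c = true) :
    ∀ n : Nat, n ≤ 26 →
      ((PySem.List.pyRange 0 (n : Int) 1).foldl pvPassB numbers).toList
        = numbers.toList.flatMap (pvF n) := by
  intro n
  induction n with
  | zero =>
    intro _
    have h0 : pvF 0 = fun c => [c] := by
      funext c; simp only [pvF]; rw [if_neg (by omega)]
    simp only [Nat.cast_zero, PySem.List.pyRange_one_eq_nil le_rfl, List.foldl_nil, h0]
    exact (List.flatMap_singleton' numbers.toList).symm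
  | succ n ih =>
    intro h
    have h26 : (n : Int) ≤ 26 := by exact_mod_cast Nat.le_of_succ_le h
    have hcast : ((n + 1 : Nat) : Int) = (n : Int) + 1 := by push_cast; ring
    rw [hcast, PySem.List.pyRange_one_succ_right (by positivity), List.foldl_append]
    simp only [List.foldl_cons, List.foldl_nil]
    rw [pvPassB_toList, ih (Nat.le_of_succ_le h)]
    exact pvStepAll n (by omega) numbers.toList hdom

-- A's per-character step equals the combined effect of all 26 passes
set_option maxRecDepth 40000 in
theorem pvStepA_eq_F26 : ∀ m ∈ List.range 127,
    pvStepA (Char.ofNat m) = pvF 26 (Char.ofNat m) := by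
  decide

theorem pvStepA_eq (c : Char) (hc : pvDomChar c = true) : pvStepA c = pvF 26 c := by
  have hlt : c.toNat < 127 := by
    simp only [pvDomChar, Bool.or_eq_true, Bool.and_eq_true, decide_eq_true_eq,
      beq_iff_eq] at hc
    omega
  have := pvStepA_eq_F26 c.toNat (List.mem_range.mpr hlt)
  simpa using this

-- A's whole loop body over a domain string, as the combined 26-pass map
theorem pvFlatMapStepA : ∀ l : List Char, (∀ c ∈ l, pvDomChar c = true) →
    l.flatMap pvStepA = l.flatMap (pvF 26) := by
  intro l
  induction l with
  | nil => intro _; simp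
  | cons c t ih =>
    intro hd
    simp only [List.flatMap_cons]
    rw [pvStepA_eq c (hd c List.mem_cons_self),
        ih (fun d hdd => hd d (List.mem_cons_of_mem c hdd))]


-- ===== VERDICT (by name: the statement is the Claim_ definition above) =====
theorem replaceAlphabets_spec : Claim_equal_replaceAlphabets := by
  intro numbers hdom
  have hd : ∀ c ∈ numbers.toList, pvDomChar c = true := by
    simpa [Dom_replaceAlphabets, pvDomStr, List.all_eq_true] using hdom
  unfold Spec_replaceAlphabets replaceAlphabets replaceAlphabets_alt
  rw [PySem.List.foldl_append_eq_flatMap]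
  have hB := pvB_chars numbers hd 26 le_rfl
  norm_num at hB
  rw [List.nil_append, pvFlatMapStepA numbers.toList hd, ← hB]
  exact String.ofList_toList
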